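-- pv_equiv track=rewrite | github.com/Veste/AdventOfCode2018 | day7/part2.py | get_next_item
-- ===== SOURCE A (Python) =====
-- def get_next_item(in_items, visited_items, claimed_items):
--     candidates = []
--     for iik, iiv in in_items.items():
--         if iik in visited_items or iik in claimed_items:
--             continue
--         if iiv.issubset(visited_items):
--             candidates.append(iik)
--     # end for
--     if len(candidates) == 0:
--         return None
--
--     return sorted(candidates)[0]
-- ===== SOURCE B (Python) =====
-- def get_next_item(in_items, visited_items, claimed_items):
--     best = None
--     for iik, iiv in in_items.items():
--         if iik in visited_items or iik in claimed_items:
--             continue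
--         if not iiv.issubset(visited_items):
--             continue
--         if best is None or iik < best:
--             best = iik
--     return best
-- ===== Notes on version B (the rewrite author's own statement) =====
-- stated objective: simpler
-- what changed: Replaces the filter-into-list then sort-and-take-[0] two-phase structure by a single scan that keeps a running minimum in one variable, never materialising or sorting a candidates list.
import Mathlib
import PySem

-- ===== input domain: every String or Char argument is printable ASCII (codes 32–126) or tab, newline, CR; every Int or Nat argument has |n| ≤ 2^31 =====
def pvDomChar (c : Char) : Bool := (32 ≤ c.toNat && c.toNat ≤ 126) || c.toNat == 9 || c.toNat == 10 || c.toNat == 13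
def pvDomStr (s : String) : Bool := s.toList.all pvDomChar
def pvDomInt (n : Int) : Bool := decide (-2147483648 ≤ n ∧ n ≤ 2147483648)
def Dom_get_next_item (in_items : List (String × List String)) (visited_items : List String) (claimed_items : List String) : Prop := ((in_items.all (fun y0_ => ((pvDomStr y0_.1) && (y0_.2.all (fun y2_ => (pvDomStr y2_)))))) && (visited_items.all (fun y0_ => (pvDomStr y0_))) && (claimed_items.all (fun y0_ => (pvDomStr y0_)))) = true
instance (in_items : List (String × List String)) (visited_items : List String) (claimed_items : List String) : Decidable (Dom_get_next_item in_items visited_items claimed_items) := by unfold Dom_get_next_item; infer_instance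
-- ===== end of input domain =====

-- B replaces the build-candidates-then-sort-and-take-first structure of A by a single running-minimum scan (objective: simpler).
-- ===== PORT A =====
def get_next_item (in_items : List (String × List String)) (visited_items : List String) (claimed_items : List String) : Option String :=
  let candidates : List String := in_items.foldl (fun acc p =>
    if p.1 ∈ visited_items ∨ p.1 ∈ claimed_items then acc
    else if p.2.all (fun d => d ∈ visited_items) then acc ++ [p.1] else acc) []
  if candidates.length = 0 then none
  else (PySem.List.sorted candidates (fun x => x) false).head?

-- ===== PORT B =====
def get_next_item_alt (in_items : List (String × List String)) (visited_items : List String) (claimed_items : List String) : Option String :=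
  in_items.foldl (fun best p =>
    if p.1 ∈ visited_items ∨ p.1 ∈ claimed_items then best
    else if ¬ (p.2.all (fun d => d ∈ visited_items)) then best
    else match best with
      | none => some p.1
      | some b => if p.1 < b then some p.1 else best) none

-- ===== PRECONDITION & SPEC =====
def Spec_get_next_item (in_items : List (String × List String)) (visited_items : List String) (claimed_items : List String) (out : Option String) : Prop := out = get_next_item_alt in_items visited_items claimed_items
instance (in_items : List (String × List String)) (visited_items : List String) (claimed_items : List String) (out : Option String) : Decidable (Spec_get_next_item in_items visited_items claimed_items out) := by unfold Spec_get_next_item; infer_instance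

-- ===== CLAIM (what is proved, stated in full; the proofs are below) =====
def Claim_equal_get_next_item : Prop := ∀ (in_items : List (String × List String)) (visited_items : List String) (claimed_items : List String), Dom_get_next_item in_items visited_items claimed_items → Spec_get_next_item in_items visited_items claimed_items (get_next_item in_items visited_items claimed_items)

-- ===== LEMMAS AND PROOFS =====

-- helpers used only by the proofs
def pvStepMin (best : Option String) (k : String) : Option String :=
  match best with
  | none => some k
  | some b => if k < b then some k else best

def pvCand (v c : List String) (l : List (String × List String)) : List String :=
  (l.filter (fun p => !(decide (p.1 ∈ v ∨ p.1 ∈ c)) && p.2.all (fun d => d ∈ v))).map (fun p => p.1)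

theorem pvCand_cons (v c : List String) (p : String × List String) (t : List (String × List String)) :
    pvCand v c (p :: t) =
      if ¬ (p.1 ∈ v ∨ p.1 ∈ c) ∧ (p.2.all (fun d => d ∈ v)) = true
      then p.1 :: pvCand v c t else pvCand v c t := by
  unfold pvCand
  rw [List.filter_cons]
  by_cases h1 : p.1 ∈ v ∨ p.1 ∈ c
  · rw [if_neg (by simp [h1]), if_neg (by tauto)]
  · by_cases h2 : (p.2.all (fun d => d ∈ v)) = true
    · rw [if_pos (by simp [h1, h2]), if_pos ⟨h1, h2⟩, List.map_cons]
    · rw [if_neg (by simp [h1, h2]), if_neg (by tauto)]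

theorem pvFoldA (v c : List String) (l : List (String × List String)) :
    ∀ (acc : List String),
    l.foldl (fun acc p =>
      if p.1 ∈ v ∨ p.1 ∈ c then acc
      else if p.2.all (fun d => d ∈ v) then acc ++ [p.1] else acc) acc
    = acc ++ pvCand v c l := by
  induction l with
  | nil => intro acc; simp [pvCand]
  | cons p t ih =>
    intro acc
    rw [List.foldl_cons, ih, pvCand_cons]
    by_cases h1 : p.1 ∈ v ∨ p.1 ∈ c
    · rw [if_pos h1, if_neg (by tauto)]
    · rw [if_neg h1]
      by_cases h2 : (p.2.all (fun d => d ∈ v)) = true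
      · rw [if_pos h2, if_pos ⟨h1, h2⟩, List.append_assoc, List.singleton_append]
      · rw [if_neg h2, if_neg (by tauto)]

theorem pvFoldB (v c : List String) (l : List (String × List String)) :
    ∀ (best : Option String),
    l.foldl (fun best p =>
      if p.1 ∈ v ∨ p.1 ∈ c then best
      else if ¬ (p.2.all (fun d => d ∈ v)) then best
      else match best with
        | none => some p.1
        | some b => if p.1 < b then some p.1 else best) best
    = (pvCand v c l).foldl pvStepMin best := by
  induction l with
  | nil => intro best; rfl
  | cons p t ih =>
    intro best
    rw [List.foldl_cons, ih, pvCand_cons]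
    by_cases h1 : p.1 ∈ v ∨ p.1 ∈ c
    · rw [if_pos h1, if_neg (by tauto)]
    · rw [if_neg h1]
      by_cases h2 : (p.2.all (fun d => d ∈ v)) = true
      · rw [if_neg (fun h => h h2), if_pos ⟨h1, h2⟩, List.foldl_cons]
        rfl
      · rw [if_pos h2, if_neg (by tauto)]

theorem pvFoldMinSome (t : List String) :
    ∀ (b : String), t.foldl pvStepMin (some b) = some (t.foldl min b) := by
  induction t with
  | nil => intro b; rfl
  | cons k t ih =>
    intro b
    rw [List.foldl_cons, List.foldl_cons]
    show t.foldl pvStepMin (if k < b then some k else some b) = _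
    by_cases h : k < b
    · rw [if_pos h, ih]
      rw [min_def, if_neg (not_le.mpr h)]
    · rw [if_neg h, ih]
      rw [min_def, if_pos (le_of_not_gt h)]

theorem pvHeadSorted (k : String) (t : List String) :
    (PySem.List.sorted (k :: t) (fun x => x) false).head? = some (List.foldl min k t) := by
  have hmin : PySem.List.min? (k :: t) (fun y => y) = some (List.foldl min k t) :=
    PySem.List.min?_id_cons k t
  have hmem : List.foldl min k t ∈ (k :: t) := PySem.List.min?_mem hmin
  have hlow : ∀ y ∈ (k :: t), List.foldl min k t ≤ y := PySem.List.min?_isMin hmin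
  cases hs : PySem.List.sorted (k :: t) (fun x => x) false with
  | nil =>
    have : (k :: t : List String) = [] :=
      (PySem.List.sorted_eq_nil_iff (k :: t) (fun x => x) false).mp hs
    exact absurd this (by simp)
  | cons m t' =>
    have hm_le : m ≤ List.foldl min k t :=
      PySem.List.key_head_sorted_le (k :: t) (fun x => x) hs _ hmem
    have hm_mem : m ∈ (k :: t) := by
      have hmem' : m ∈ PySem.List.sorted (k :: t) (fun x => x) false := by
        rw [hs]; exact List.mem_cons_self
      exact (PySem.List.mem_sorted (k :: t) (fun x => x) false m).mp hmem'
    have : m = List.foldl min k t := le_antisymm hm_le (hlow m hm_mem)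
    rw [List.head?_cons, this]

theorem pvFoldMinHead (cand : List String) :
    (if cand.length = 0 then none
     else (PySem.List.sorted cand (fun x => x) false).head?)
    = cand.foldl pvStepMin none := by
  cases cand with
  | nil => rfl
  | cons k t =>
    rw [if_neg (by simp)]
    show _ = t.foldl pvStepMin (some k)
    rw [pvFoldMinSome, pvHeadSorted]

-- ===== VERDICT (by name: the statement is the Claim_ definition above) =====
theorem get_next_item_spec : Claim_equal_get_next_item := by
  intro in_items v c _
  unfold Spec_get_next_item get_next_item get_next_item_alt
  rw [pvFoldA v c in_items [], pvFoldB v c in_items none, List.nil_append,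
    pvFoldMinHead]
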